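-- pv_equiv track=rewrite | github.com/gudals-kim/Studyroom | 프로그래머스/unrated/155652. 둘만의 암호/둘만의 암호.py | solution
-- ===== SOURCE A (Python) =====
-- def z넘으면안돼(단어):
--     if 단어>122:
--         단어=97+단어-122-1
--     return 단어
--
-- def solution(s, skip, index):
--     s = [ord(i) for i in s]
--     skip = [ord(i) for i in skip]
--     keepSkip = {i:False for i in range(97,123)}
--     for i in skip:
--         keepSkip[i]=True
--     answer = ""
--     for 단어 in s:
--         count = 0
--         while count<index:
--             count += 1
--             단어=단어+1
--             단어=z넘으면안돼(단어)
--             while keepSkip[단어]: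
--                 단어+=1
--                 단어 = z넘으면안돼(단어)
--         answer+=chr(단어)
--
--     return answer
-- ===== SOURCE B (Python) =====
-- def solution(s, skip, index):
--     skipset = set(skip)
--     allowed = [chr(c) for c in range(97, 123) if chr(c) not in skipset]
--     out = []
--     for ch in s:
--         if index <= 0:
--             out.append(ch)
--         else:
--             L = len(allowed)
--             p0 = sum(1 for a in allowed if a <= ch) % L
--             out.append(allowed[(p0 + index - 1) % L])
--     return ''.join(out)
-- ===== Notes on version B (the rewrite author's own statement) =====
-- stated objective: faster
-- what changed: B replaces A's per-character simulation (index outer steps, each scanning forward over skipped letters with a wrap helper) by building the ordered list of allowed letters once and emitting allowed[(p0 + index - 1) % len(allowed)] via direct modular-arithmetic position lookup, one O(1) computation per character.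
-- outside the precondition, e.g. on solution('~', '', 1): A returns 'e', B returns 'a'; on solution('`', '', 1): A returns 'a', B returns 'a'
import Mathlib
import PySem

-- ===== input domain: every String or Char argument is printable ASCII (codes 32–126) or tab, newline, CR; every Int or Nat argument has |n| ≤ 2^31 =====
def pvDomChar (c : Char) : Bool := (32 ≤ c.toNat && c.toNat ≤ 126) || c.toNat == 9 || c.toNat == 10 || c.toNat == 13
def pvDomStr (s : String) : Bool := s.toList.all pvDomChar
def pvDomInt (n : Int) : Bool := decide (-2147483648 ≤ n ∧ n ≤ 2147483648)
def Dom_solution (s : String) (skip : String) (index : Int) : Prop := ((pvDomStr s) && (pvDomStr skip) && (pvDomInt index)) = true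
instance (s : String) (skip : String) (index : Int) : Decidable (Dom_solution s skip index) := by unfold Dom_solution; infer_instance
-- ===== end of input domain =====

-- B replaces A's per-character stepping loops (index outer steps × skip-scan inner loop) by one
-- closed-form modular lookup in the ordered list of allowed letters (objective: faster).

-- ===== PORT A =====
-- helper z넘으면안돼: wrap past 'z' back to 'a'
def pvWrap (w : Int) : Int := if w > 122 then 97 + w - 122 - 1 else w

-- keepSkip = {i: False for i in range(97,123)}; then keepSkip[i] = True for i in skip-ords
def pvKeep (skl : List Int) : PySem.Dict Int Bool :=
  skl.foldl (fun d i => d.insert i true)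
    ((PySem.List.pyRange 97 123 1).foldl (fun d i => d.insert i false) PySem.Dict.empty)

-- inner 'while keepSkip[단어]' loop; fuel 26 suffices inside Pre_ (some letter is not skipped,
-- and the walk revisits its start after 26 steps), where the loop always terminates
def pvInner (ks : PySem.Dict Int Bool) : Nat → Int → Int
  | 0, w => w
  | f + 1, w => if ks.getD w false then pvInner ks f (pvWrap (w + 1)) else w

-- outer 'while count < index' loop: exactly max(index,0) iterations
def pvOuter (ks : PySem.Dict Int Bool) : Nat → Int → Int
  | 0, w => w
  | n + 1, w => pvOuter ks n (pvInner ks 26 (pvWrap (w + 1)))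

def solution (s : String) (skip : String) (index : Int) : String :=
  let sl : List Int := s.toList.map (fun c => (c.toNat : Int))
  let skl : List Int := skip.toList.map (fun c => (c.toNat : Int))
  let ks := pvKeep skl
  String.ofList (sl.foldl (fun acc w => acc ++ [Char.ofNat (pvOuter ks index.toNat w).toNat]) [])

-- ===== PORT B =====
def solution_alt (s : String) (skip : String) (index : Int) : String :=
  let skipset : PySem.Set Char := PySem.Set.ofList skip.toList
  let allowed : List Char :=
    ((PySem.List.pyRange 97 123 1).filter
      (fun c => !(PySem.Set.contains skipset (Char.ofNat c.toNat)))).map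
      (fun c => Char.ofNat c.toNat)
  let L : Int := allowed.length
  String.ofList (s.toList.foldl (fun acc ch =>
    if index ≤ 0 then acc ++ [ch]
    else
      let p0 := PySem.Int.mod ((allowed.filter (fun a => a ≤ ch)).length : Int) L
      acc ++ [(PySem.List.pyGet? allowed (PySem.Int.mod (p0 + index - 1) L)).getD ch]) [])

-- ===== PRECONDITION & SPEC =====
-- Pre_ excludes, for index > 0 only: (a) s containing a non-lowercase character — there A raises
-- KeyError on most such characters and its value on the few that survive is a wraparound accident
-- of the 97..122 dict; (b) skip covering all 26 lowercase letters — there A loops forever.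
def Pre_solution (s : String) (skip : String) (index : Int) : Prop :=
  0 < index →
    (s.toList.all (fun c => 97 ≤ c.toNat && c.toNat ≤ 122)) = true ∧
      ((PySem.List.pyRange 97 123 1).any (fun c => !(skip.toList.contains (Char.ofNat c.toNat)))) = true
instance (s : String) (skip : String) (index : Int) : Decidable (Pre_solution s skip index) := by
  unfold Pre_solution; infer_instance

def pvWitness_solution : String × String × Int := ("ab", "c", 3)

def Spec_solution (s : String) (skip : String) (index : Int) (out : String) : Prop := out = solution_alt s skip index
instance (s : String) (skip : String) (index : Int) (out : String) : Decidable (Spec_solution s skip index out) := by unfold Spec_solution; infer_instance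

-- ===== CLAIM (what is proved, stated in full; the proofs are below) =====
def Claim_equal_solution : Prop := ∀ (s : String) (skip : String) (index : Int), Dom_solution s skip index → Pre_solution s skip index → Spec_solution s skip index (solution s skip index)

-- ===== LEMMAS AND PROOFS =====
def pvCyc (w : Int) (k : Nat) : Int := 97 + (w - 97 + (k : Int)) % 26

lemma pvCyc_bounds (w : Int) (k : Nat) : 97 ≤ pvCyc w k ∧ pvCyc w k ≤ 122 := by
  unfold pvCyc; omega

lemma pvWrap_succ {w : Int} (h1 : 97 ≤ w) (h2 : w ≤ 122) : pvWrap (w + 1) = pvCyc w 1 := by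
  unfold pvWrap pvCyc; split_ifs <;> omega

lemma pvCyc_succ (w : Int) (k : Nat) :
    pvCyc w (k + 1) = pvCyc (pvCyc w 1) k := by
  unfold pvCyc; push_cast; omega

lemma pvCyc_zero {w : Int} (h1 : 97 ≤ w) (h2 : w ≤ 122) : pvCyc w 0 = w := by
  unfold pvCyc; omega

lemma pvCyc_hit {w a : Int} (ha1 : 97 ≤ a) (ha2 : a ≤ 122) :
    ∃ k, k < 26 ∧ pvCyc w k = a := by
  refine ⟨((a - w) % 26).toNat, by omega, ?_⟩
  unfold pvCyc; omega
lemma keep_true (l : List Int) (d : PySem.Dict Int Bool) (w : Int) :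
    (l.foldl (fun d i => d.insert i true) d).getD w false = (l.contains w || d.getD w false) := by
  induction l generalizing d with
  | nil => simp
  | cons a t ih =>
      simp only [List.foldl_cons, ih, PySem.Dict.getD_insert, List.contains_cons]
      by_cases h : w = a
      · subst h; simp
      · simp [beq_eq_false_iff_ne.mpr h, h]


lemma keep_false (l : List Int) (d : PySem.Dict Int Bool) (w : Int)
    (hd : d.getD w false = false) :
    (l.foldl (fun d i => d.insert i false) d).getD w false = false := by
  induction l generalizing d with
  | nil => simpa using hd
  | cons a t ih =>
      simp only [List.foldl_cons]
      exact ih _ (by rw [PySem.Dict.getD_insert]; split <;> simp [hd])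
lemma pvKeep_getD (skl : List Int) (w : Int) :
    (pvKeep skl).getD w false = skl.contains w := by
  unfold pvKeep
  rw [keep_true, keep_false]
  · simp
  · simp [PySem.Dict.getD_empty]
def pvAI (skl : List Int) : List Int :=
  (PySem.List.pyRange 97 123 1).filter (fun w => !skl.contains w)
def pvN (l : List Int) (w : Int) : Nat := (l.filter (fun a => a < w)).length
def pvM (l : List Int) (w : Int) : Nat := (l.filter (fun a => a ≤ w)).length

lemma mem_pvAI (skl : List Int) (w : Int) :
    w ∈ pvAI skl ↔ (97 ≤ w ∧ w ≤ 122) ∧ ¬ skl.contains w = true := by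
  simp [pvAI, List.mem_filter, PySem.List.mem_pyRange_one]
  omega

lemma pvAI_pairwise (skl : List Int) : (pvAI skl).Pairwise (· < ·) :=
  (PySem.List.pairwise_lt_pyRange_one 97 123).filter _

lemma filter_le_of_mem {l : List Int} (hl : l.Pairwise (· < ·)) {w : Int} (hw : w ∈ l) :
    l.filter (fun a => a ≤ w) = l.filter (fun a => a < w) ++ [w] := by
  induction l with
  | nil => simp at hw
  | cons a t ih =>
      rcases List.pairwise_cons.mp hl with ⟨ha, ht⟩
      rcases List.mem_cons.mp hw with h | h
      · subst h
        have h1 : t.filter (fun x => decide (x ≤ w)) = [] :=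
          List.filter_eq_nil_iff.mpr (fun x hx => by simp; exact (ha x hx))
        have h2 : t.filter (fun x => decide (x < w)) = [] :=
          List.filter_eq_nil_iff.mpr (fun x hx => by simp; exact le_of_lt (ha x hx))
        simp [h1, h2]
      · have haw : a < w := ha w h
        simp only [List.filter_cons]
        rw [if_pos (by simp [le_of_lt haw]), if_pos (by simp [haw]), ih ht h]
        simp

lemma filter_le_of_not_mem {l : List Int} {w : Int} (hw : w ∉ l) :
    l.filter (fun a => a ≤ w) = l.filter (fun a => a < w) := by
  apply List.filter_congr
  intro x hx
  have : x ≠ w := fun h => hw (h ▸ hx)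
  simp; omega

lemma getElem?_pvN {l : List Int} (hl : l.Pairwise (· < ·)) {w : Int} (hw : w ∈ l) :
    l[pvN l w]? = some w := by
  induction l with
  | nil => simp at hw
  | cons a t ih =>
      rcases List.pairwise_cons.mp hl with ⟨ha, ht⟩
      rcases List.mem_cons.mp hw with h | h
      · subst h
        have h2 : t.filter (fun x => decide (x < w)) = [] :=
          List.filter_eq_nil_iff.mpr (fun x hx => by simp; exact le_of_lt (ha x hx))
        simp [pvN, h2]
      · have haw : a < w := ha w h
        simp only [pvN, List.filter_cons, if_pos (by simp [haw] : decide (a < w) = true)]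
        simpa [pvN] using ih ht h

lemma pvN_lt_length {l : List Int} (hl : l.Pairwise (· < ·)) {w : Int} (hw : w ∈ l) :
    pvN l w < l.length := by
  have := getElem?_pvN hl hw
  exact List.getElem?_eq_some_iff.mp this |>.1

lemma pvN_getD {l : List Int} (hl : l.Pairwise (· < ·)) {p : Nat} (hp : p < l.length) :
    pvN l (l.getD p 0) = p := by
  have hmem : l.getD p 0 ∈ l := by
    rw [List.getD_eq_getElem l 0 hp]; exact List.getElem_mem hp
  have h1 := getElem?_pvN hl hmem
  have h2 : l[p]? = some (l.getD p 0) := by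
    rw [List.getD_eq_getElem l 0 hp]; simp [hp]
  have hnd : l.Nodup := hl.imp ne_of_lt
  exact List.getElem?_inj (pvN_lt_length hl hmem) hnd (h1.trans h2.symm)

lemma pvM_of_mem {l : List Int} (hl : l.Pairwise (· < ·)) {w : Int} (hw : w ∈ l) :
    pvM l w = pvN l w + 1 := by
  simp [pvM, pvN, filter_le_of_mem hl hw]

lemma pvM_of_not_mem {l : List Int} {w : Int} (hw : w ∉ l) : pvM l w = pvN l w := by
  simp [pvM, pvN, filter_le_of_not_mem hw]

lemma pvM_step (skl : List Int) {w : Int} (h1 : 97 ≤ w) (h2 : w ≤ 122) :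
    pvN (pvAI skl) (pvCyc w 1) % (pvAI skl).length = pvM (pvAI skl) w % (pvAI skl).length := by
  by_cases hw : w = 122
  · subst hw
    have hc : pvCyc 122 1 = 97 := by unfold pvCyc; omega
    have hN : pvN (pvAI skl) 97 = 0 := by
      simp only [pvN, List.length_eq_zero_iff]
      exact List.filter_eq_nil_iff.mpr (fun x hx => by
        have := (mem_pvAI skl x).mp hx
        simp; omega)
    have hM : pvM (pvAI skl) 122 = (pvAI skl).length := by
      simp only [pvM]
      rw [List.filter_eq_self.mpr (fun x hx => by
        have := (mem_pvAI skl x).mp hx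
        simp; omega)]
    rw [hc, hN, hM]
    simp
  · have hc : pvCyc w 1 = w + 1 := by unfold pvCyc; omega
    have : pvN (pvAI skl) (w + 1) = pvM (pvAI skl) w := by
      simp only [pvN, pvM]
      congr 1
      apply List.filter_congr
      intro x _
      simp
    rw [hc, this]



lemma pvInner_eq (skl : List Int) (f : Nat) (w : Int) (h1 : 97 ≤ w) (h2 : w ≤ 122)
    (hex : ∃ k, k < f ∧ pvCyc w k ∈ pvAI skl) :
    pvInner (pvKeep skl) f w = (pvAI skl).getD (pvN (pvAI skl) w % (pvAI skl).length) 0 := by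
  induction f generalizing w with
  | zero => simp at hex
  | succ f ih =>
      rw [pvInner, pvKeep_getD]
      by_cases hc : skl.contains w
      · -- w is skipped: recurse
        have hwni : w ∉ pvAI skl := fun hmem => by
          have := (mem_pvAI skl w).mp hmem; exact this.2 hc
        obtain ⟨k, hk, hmem⟩ := hex
        have hk0 : k ≠ 0 := by
          intro h; subst h
          rw [pvCyc_zero h1 h2] at hmem; exact hwni hmem
        obtain ⟨k', rfl⟩ := Nat.exists_eq_succ_of_ne_zero hk0
        have hex' : ∃ k, k < f ∧ pvCyc (pvCyc w 1) k ∈ pvAI skl :=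
          ⟨k', by omega, by rwa [← pvCyc_succ w k']⟩
        have hb := pvCyc_bounds w 1
        rw [if_pos hc, pvWrap_succ h1 h2, ih (pvCyc w 1) hb.1 hb.2 hex']
        congr 1
        rw [pvM_step skl h1 h2, pvM_of_not_mem hwni]
      · have hwmem : w ∈ pvAI skl := (mem_pvAI skl w).mpr ⟨⟨h1, h2⟩, by simpa using hc⟩
        rw [if_neg (by simpa using hc)]
        have hlt := pvN_lt_length (pvAI_pairwise skl) hwmem
        rw [Nat.mod_eq_of_lt hlt]
        have := getElem?_pvN (pvAI_pairwise skl) hwmem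
        rw [List.getD_eq_getElem?_getD, this]
        rfl

lemma pvAI_mem_bounds {skl : List Int} {x : Int} (hx : x ∈ pvAI skl) : 97 ≤ x ∧ x ≤ 122 :=
  ((mem_pvAI skl x).mp hx).1

lemma pvAI_getD_mem {skl : List Int} {p : Nat} (hp : p < (pvAI skl).length) :
    (pvAI skl).getD p 0 ∈ pvAI skl := by
  rw [List.getD_eq_getElem _ 0 hp]; exact List.getElem_mem hp

lemma pvInner26 (skl : List Int) (hne : pvAI skl ≠ []) {w : Int} (h1 : 97 ≤ w) (h2 : w ≤ 122) :
    pvInner (pvKeep skl) 26 w = (pvAI skl).getD (pvN (pvAI skl) w % (pvAI skl).length) 0 := by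
  obtain ⟨a, ha⟩ := List.exists_mem_of_ne_nil _ hne
  have hab := pvAI_mem_bounds ha
  obtain ⟨k, hk, hck⟩ := pvCyc_hit hab.1 hab.2
  exact pvInner_eq skl 26 w h1 h2 ⟨k, hk, hck ▸ ha⟩

lemma pvOuter_pos (skl : List Int) (hne : pvAI skl ≠ []) (n : Nat) (p : Nat)
    (hp : p < (pvAI skl).length) :
    pvOuter (pvKeep skl) n ((pvAI skl).getD p 0)
      = (pvAI skl).getD ((p + n) % (pvAI skl).length) 0 := by
  induction n generalizing p with
  | zero => rw [pvOuter, Nat.add_zero, Nat.mod_eq_of_lt hp]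
  | succ n ih =>
      set w := (pvAI skl).getD p 0 with hw
      have hwm : w ∈ pvAI skl := pvAI_getD_mem hp
      have hwb := pvAI_mem_bounds hwm
      rw [pvOuter, pvWrap_succ hwb.1 hwb.2, pvInner26 skl hne (pvCyc_bounds w 1).1 (pvCyc_bounds w 1).2]
      have hstep : pvN (pvAI skl) (pvCyc w 1) % (pvAI skl).length = (p + 1) % (pvAI skl).length := by
        rw [pvM_step skl hwb.1 hwb.2, pvM_of_mem (pvAI_pairwise skl) hwm, hw, pvN_getD (pvAI_pairwise skl) hp]
      rw [hstep]
      have hlt : (p + 1) % (pvAI skl).length < (pvAI skl).length :=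
        Nat.mod_lt _ (List.length_pos_iff.mpr hne)
      rw [ih _ hlt, Nat.mod_add_mod]
      have h3 : p + 1 + n = p + (n + 1) := by omega
      rw [h3]

lemma pvOuter_eq (skl : List Int) (hne : pvAI skl ≠ []) (m : Nat) {w : Int}
    (h1 : 97 ≤ w) (h2 : w ≤ 122) :
    pvOuter (pvKeep skl) (m + 1) w
      = (pvAI skl).getD ((pvM (pvAI skl) w + m) % (pvAI skl).length) 0 := by
  have hb := pvCyc_bounds w 1
  rw [pvOuter, pvWrap_succ h1 h2, pvInner26 skl hne hb.1 hb.2]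
  have hlt : pvN (pvAI skl) (pvCyc w 1) % (pvAI skl).length < (pvAI skl).length :=
    Nat.mod_lt _ (List.length_pos_iff.mpr hne)
  rw [pvOuter_pos skl hne m _ hlt, pvM_step skl h1 h2, Nat.mod_add_mod]

def pvChr (a : Int) : Char := Char.ofNat a.toNat

lemma pvChr_toNat {a : Int} (h1 : 97 ≤ a) (h2 : a ≤ 122) : ((pvChr a).toNat : Int) = a := by
  unfold pvChr
  rw [Char.toNat_ofNat]
  rw [if_pos (Or.inl (by omega) : Nat.isValidChar a.toNat)]
  omega

lemma char_le_iff (c d : Char) : (c ≤ d) ↔ (c.toNat ≤ d.toNat) := by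
  rw [Char.le_def]; rfl

lemma chr_mem_iff (sc : List Char) {c : Int} (h1 : 97 ≤ c) (h2 : c ≤ 122) :
    Char.ofNat c.toNat ∈ sc ↔ (sc.map (fun d => (d.toNat : Int))).contains c = true := by
  constructor
  · intro h
    simp only [List.contains_eq_mem, List.mem_map, decide_eq_true_eq]
    exact ⟨Char.ofNat c.toNat, h, pvChr_toNat h1 h2⟩
  · intro h
    simp only [List.contains_eq_mem, List.mem_map, decide_eq_true_eq] at h
    obtain ⟨d, hd, hdc⟩ := h
    have : Char.ofNat c.toNat = d := by
      rw [← hdc]; simp [Int.toNat_natCast, Char.ofNat_toNat]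
    rwa [this]

lemma allowed_eq (skip : String) :
    ((PySem.List.pyRange 97 123 1).filter
        (fun c => !(PySem.Set.contains (PySem.Set.ofList skip.toList) (Char.ofNat c.toNat)))).map
        (fun c => Char.ofNat c.toNat)
      = (pvAI (skip.toList.map (fun c => (c.toNat : Int)))).map pvChr := by
  unfold pvAI
  rw [List.filter_congr (fun c hc => ?_)]
  · rfl
  · have hb : 97 ≤ c ∧ c ≤ 122 := by
      rw [PySem.List.mem_pyRange_one] at hc; omega
    have hiff := chr_mem_iff skip.toList hb.1 hb.2
    simp only [List.contains_eq_mem, decide_eq_true_eq] at hiff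
    simp only [PySem.Set.contains_eq_listContains, List.contains_eq_mem, PySem.Set.mem_ofList]
    simp [hiff]

theorem solution_eq_alt (s : String) (skip : String) (index : Int)
    (hpre : 0 < index →
      (s.toList.all (fun c => 97 ≤ c.toNat && c.toNat ≤ 122)) = true ∧
        ((PySem.List.pyRange 97 123 1).any (fun c => !(skip.toList.contains (Char.ofNat c.toNat)))) = true) :
    solution s skip index = solution_alt s skip index := by
  unfold solution solution_alt
  simp only [allowed_eq skip]
  by_cases hidx : index ≤ 0
  · simp only [if_pos hidx]
    rw [PySem.List.foldl_append_singleton_eq_map, PySem.List.foldl_append_singleton]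
    rw [List.map_map]
    have hz : index.toNat = 0 := Int.toNat_of_nonpos hidx
    simp [hz, pvOuter, Function.comp_def, Char.ofNat_toNat]
  · rw [not_le] at hidx
    obtain ⟨hlowb, hexb⟩ := hpre hidx
    have hlow : ∀ c ∈ s.toList, 97 ≤ c.toNat ∧ c.toNat ≤ 122 := by
      intro c hc
      have := List.all_eq_true.mp hlowb c hc
      simpa using this
    obtain ⟨c0, hc0mem, hc0nb⟩ := List.any_eq_true.mp hexb
    have hc0notin : Char.ofNat c0.toNat ∉ skip.toList := by
      simpa using hc0nb
    set skl : List Int := skip.toList.map (fun c => (c.toNat : Int)) with hskl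
    have hc0b : 97 ≤ c0 ∧ c0 ≤ 122 := by
      rw [PySem.List.mem_pyRange_one] at hc0mem; omega
    have hc0ai : c0 ∈ pvAI skl := by
      rw [mem_pvAI]
      refine ⟨hc0b, fun hcon => hc0notin ?_⟩
      exact (chr_mem_iff skip.toList hc0b.1 hc0b.2).mpr hcon
    have hne : pvAI skl ≠ [] := List.ne_nil_of_mem hc0ai
    have hLpos : 0 < (pvAI skl).length := List.length_pos_iff.mpr hne
    simp only [if_neg (by omega : ¬ index ≤ 0)]
    rw [PySem.List.foldl_append_singleton_eq_map, PySem.List.foldl_append_singleton_eq_map]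
    rw [List.map_map]
    apply congrArg
    apply List.map_congr_left
    intro c hcmem
    have hcb := hlow c hcmem
    set w : Int := (c.toNat : Int) with hwdef
    have hw1 : (97 : Int) ≤ w := by omega
    have hw2 : w ≤ 122 := by omega
    obtain ⟨m, hm⟩ : ∃ m, index.toNat = m + 1 :=
      ⟨index.toNat - 1, by omega⟩
    -- A side
    rw [Function.comp_apply, hm, pvOuter_eq skl hne m hw1 hw2]
    -- B side: the filter length is pvM
    have hfl : ((pvAI skl).map pvChr).filter (fun a => a ≤ c) = ((pvAI skl).filter (fun a => a ≤ w)).map pvChr := by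
      rw [List.filter_map]
      congr 1
      apply List.filter_congr
      intro x hx
      have hxb := pvAI_mem_bounds hx
      simp only [Function.comp_apply]
      rw [Bool.eq_iff_iff, decide_eq_true_iff, decide_eq_true_iff, char_le_iff]
      have := pvChr_toNat hxb.1 hxb.2
      omega
    rw [hfl, List.length_map, List.length_map]
    have hMr : ((pvAI skl).filter (fun a => a ≤ w)).length = pvM (pvAI skl) w := rfl
    rw [hMr]
    set L := (pvAI skl).length with hL
    rw [PySem.Int.mod_natCast]
    have hidxeq : index = ((m : Int) + 1) := by omega
    have hexp : (((pvM (pvAI skl) w % L : Nat) : Int) + index - 1) = (((pvM (pvAI skl) w % L + m : Nat)) : Int) := by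
      push_cast; omega
    rw [hexp, PySem.Int.mod_natCast, Nat.mod_add_mod, PySem.List.pyGet?_natCast]
    have hk : (pvM (pvAI skl) w + m) % L < L := Nat.mod_lt _ hLpos
    rw [List.getElem?_map, List.getElem?_eq_getElem hk]
    rw [List.getD_eq_getElem _ 0 hk]
    rfl

-- ===== VERDICT (by name: the statement is the Claim_ definition above) =====
theorem solution_spec : Claim_equal_solution := by
  intro s skip index _hdom hpre
  unfold Spec_solution
  exact solution_eq_alt s skip index hpre
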